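-- pv_equiv track=rewrite | github.com/yashwanthgk88/AppSec-AI | backend/services/snow_client.py | _format_security_requirements_text
-- ===== SOURCE A (Python) =====
-- def _format_security_requirements_text(requirements: list[dict]) -> str:
--     """Format security requirements as plain text."""
--     lines = ["=" * 50, "SECURITY REQUIREMENTS", "=" * 50, ""]
--
--     # Group by priority
--     priority_order = ["Critical", "High", "Medium", "Low"]
--     grouped = {p: [] for p in priority_order}
--     for req in requirements:
--         priority = req.get("priority", "Medium")
--         if priority in grouped:
--             grouped[priority].append(req)
--         else:
--             grouped["Medium"].append(req)
--
--     for priority in priority_order: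
--         reqs = grouped[priority]
--         if not reqs:
--             continue
--
--         lines.append(f"--- {priority.upper()} PRIORITY ({len(reqs)}) ---")
--         for req in reqs:
--             lines.append(f"[{req.get('id', 'N/A')}] {req.get('text', '')}")
--             lines.append(f"    Category: {req.get('category', 'N/A')}")
--             if req.get("details"):
--                 lines.append(f"    Details: {req.get('details')}")
--             lines.append("")
--
--     lines.append("=" * 50)
--     lines.append(f"Generated by SecureDev AI | Total: {len(requirements)} requirements")
--     lines.append("=" * 50)
--
--     return "\n".join(lines)
-- ===== SOURCE B (Python) =====
-- def _format_security_requirements_text(requirements: list[dict]) -> str: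
--     """Format security requirements as plain text."""
--     NAMES = ["Critical", "High", "Medium", "Low"]
--     RANK = {"Critical": 0, "High": 1, "Medium": 2, "Low": 3}
--
--     def rank(req):
--         return RANK.get(req.get("priority", "Medium"), 2)
--
--     def block(req):
--         b = ["[%s] %s" % (req.get("id", "N/A"), req.get("text", "")),
--              "    Category: %s" % req.get("category", "N/A")]
--         d = req.get("details")
--         if d:
--             b.append("    Details: %s" % d)
--         b.append("")
--         return b
--
--     bar = "=" * 50
--     body = []
--     for i, name in enumerate(NAMES):
--         group = [r for r in requirements if rank(r) == i]
--         if group: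
--             body.append("--- %s PRIORITY (%d) ---" % (name.upper(), len(group)))
--             for r in group:
--                 body.extend(block(r))
--
--     return "\n".join(
--         [bar, "SECURITY REQUIREMENTS", bar, ""]
--         + body
--         + [bar, "Generated by SecureDev AI | Total: %d requirements" % len(requirements), bar]
--     )
-- ===== Notes on version B (the rewrite author's own statement) =====
-- stated objective: alternative
-- what changed: Replaces the mutable priority->bucket dict (one grouping pass, then a dict read per priority) with a rank function and one filter pass per priority, assembling the output by list concatenation and a single join instead of repeated appends into a shared lines list.
import Mathlib
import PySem

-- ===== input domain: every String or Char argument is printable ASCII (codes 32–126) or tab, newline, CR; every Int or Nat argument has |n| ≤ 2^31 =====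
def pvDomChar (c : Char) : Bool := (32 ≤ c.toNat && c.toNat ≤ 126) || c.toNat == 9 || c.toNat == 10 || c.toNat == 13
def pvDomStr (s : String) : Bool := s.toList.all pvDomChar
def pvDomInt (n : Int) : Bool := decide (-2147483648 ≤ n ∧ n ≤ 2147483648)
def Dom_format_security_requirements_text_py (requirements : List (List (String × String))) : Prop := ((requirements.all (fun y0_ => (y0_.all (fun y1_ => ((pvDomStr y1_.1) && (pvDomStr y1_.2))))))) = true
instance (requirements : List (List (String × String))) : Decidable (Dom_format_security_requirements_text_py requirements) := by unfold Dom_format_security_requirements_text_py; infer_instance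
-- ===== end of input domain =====

-- B replaces A's mutable priority->bucket dict (group in one pass, then read each bucket) with a
-- rank function and one filter pass per priority, assembling the output by list concatenation and
-- a single join; objective: alternative decomposition (similar cost), identical return value.

-- req.get(k, d) / req.get(k) on a Python dict, as first-match lookup on the association list
def reqGetD (req : List (String × String)) (k d : String) : String :=
  match req.find? (fun kv => kv.1 == k) with
  | some kv => kv.2
  | none => d

def reqGet? (req : List (String × String)) (k : String) : Option String :=
  (req.find? (fun kv => kv.1 == k)).map (fun kv => kv.2)

-- ===== PORT A =====
def format_security_requirements_text_py (requirements : List (List (String × String))) : String :=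
  let bar : String := "=================================================="
  let lines : List String := [bar, "SECURITY REQUIREMENTS", bar, ""]
  let priority_order : List String := ["Critical", "High", "Medium", "Low"]
  let grouped : PySem.Dict String (List (List (String × String))) :=
    ((((PySem.Dict.empty).insert "Critical" []).insert "High" []).insert "Medium" []).insert "Low" []
  let grouped := requirements.foldl (fun g req =>
    let priority := reqGetD req "priority" "Medium"
    if g.contains priority then g.modify priority [] (fun l => l ++ [req])
    else g.modify "Medium" [] (fun l => l ++ [req])) grouped
  let lines := priority_order.foldl (fun lines priority =>
    let reqs := grouped.getD priority []
    if reqs.isEmpty then lines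
    else
      let lines := lines ++ ["--- " ++ PySem.Str.upper priority ++ " PRIORITY (" ++ PySem.Int.toStr (reqs.length : Int) ++ ") ---"]
      reqs.foldl (fun lines req =>
        let lines := lines ++ ["[" ++ reqGetD req "id" "N/A" ++ "] " ++ reqGetD req "text" ""]
        let lines := lines ++ ["    Category: " ++ reqGetD req "category" "N/A"]
        let lines := match reqGet? req "details" with
          | some d => if d ≠ "" then lines ++ ["    Details: " ++ d] else lines
          | none => lines
        lines ++ [""]) lines) lines
  let lines := lines ++ [bar]
  let lines := lines ++ ["Generated by SecureDev AI | Total: " ++ PySem.Int.toStr (requirements.length : Int) ++ " requirements"]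
  let lines := lines ++ [bar]
  PySem.Str.join "\n" lines

-- ===== PORT B =====
-- RANK.get(req.get("priority", "Medium"), 2)
def pvRank (req : List (String × String)) : Int :=
  (PySem.Dict.ofList [("Critical", (0 : Int)), ("High", 1), ("Medium", 2), ("Low", 3)]).getD
    (reqGetD req "priority" "Medium") 2

-- block(req): the output lines for one requirement
def pvBlock (req : List (String × String)) : List String :=
  let b : List String :=
    ["[" ++ reqGetD req "id" "N/A" ++ "] " ++ reqGetD req "text" "",
     "    Category: " ++ reqGetD req "category" "N/A"]
  let b := match reqGet? req "details" with
    | some d => if d ≠ "" then b ++ ["    Details: " ++ d] else b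
    | none => b
  b ++ [""]

def format_security_requirements_text_py_alt (requirements : List (List (String × String))) : String :=
  let bar : String := "=================================================="
  let body := (PySem.List.enumerate ["Critical", "High", "Medium", "Low"] 0).foldl (fun body pr =>
    let group := requirements.filter (fun r => pvRank r == pr.1)
    if group.isEmpty then body
    else
      group.foldl (fun body r => body ++ pvBlock r)
        (body ++ ["--- " ++ PySem.Str.upper pr.2 ++ " PRIORITY (" ++ PySem.Int.toStr (group.length : Int) ++ ") ---"])) []
  PySem.Str.join "\n"
    ([bar, "SECURITY REQUIREMENTS", bar, ""] ++ body ++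
     [bar, "Generated by SecureDev AI | Total: " ++ PySem.Int.toStr (requirements.length : Int) ++ " requirements", bar])

-- ===== PRECONDITION & SPEC =====
def Spec_format_security_requirements_text_py (requirements : List (List (String × String))) (out : String) : Prop := out = format_security_requirements_text_py_alt requirements
instance (requirements : List (List (String × String))) (out : String) : Decidable (Spec_format_security_requirements_text_py requirements out) := by unfold Spec_format_security_requirements_text_py; infer_instance

-- ===== CLAIM (what is proved, stated in full; the proofs are below) =====
def Claim_equal_format_security_requirements_text_py : Prop := ∀ (requirements : List (List (String × String))), Dom_format_security_requirements_text_py requirements → Spec_format_security_requirements_text_py requirements (format_security_requirements_text_py requirements)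

-- ===== LEMMAS AND PROOFS =====

-- the bucket name A's grouping loop files a requirement under
def pvBucket (req : List (String × String)) : String :=
  let p := reqGetD req "priority" "Medium"
  if p = "Critical" ∨ p = "High" ∨ p = "Medium" ∨ p = "Low" then p else "Medium"

def pvFilt (requirements : List (List (String × String))) (i : Int) : List (List (String × String)) :=
  requirements.filter (fun r => pvRank r == i)

def pvSect (requirements : List (List (String × String))) (i : Int) (nm : String) : List String :=
  let g := pvFilt requirements i
  if g.isEmpty then []
  else ("--- " ++ PySem.Str.upper nm ++ " PRIORITY (" ++ PySem.Int.toStr (g.length : Int) ++ ") ---") :: g.flatMap pvBlock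

theorem pvOfListEq : PySem.Dict.ofList [("Critical", (0 : Int)), ("High", 1), ("Medium", 2), ("Low", 3)]
    = ((((PySem.Dict.empty).insert "Critical" (0 : Int)).insert "High" 1).insert "Medium" 2).insert "Low" 3 := by rfl

theorem pvPred_critical : (fun r : List (String × String) => pvBucket r == "Critical") = (fun r => pvRank r == (0 : Int)) := by
  funext r
  simp only [pvBucket, pvRank, pvOfListEq, PySem.Dict.getD_insert, PySem.Dict.getD_empty]
  generalize reqGetD r "priority" "Medium" = p
  by_cases h1 : p = "Critical"
  · subst h1; decide
  by_cases h2 : p = "High"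
  · subst h2; decide
  by_cases h3 : p = "Medium"
  · subst h3; decide
  by_cases h4 : p = "Low"
  · subst h4; decide
  simp [h1, h2, h3, h4]

theorem pvPred_high : (fun r : List (String × String) => pvBucket r == "High") = (fun r => pvRank r == (1 : Int)) := by
  funext r
  simp only [pvBucket, pvRank, pvOfListEq, PySem.Dict.getD_insert, PySem.Dict.getD_empty]
  generalize reqGetD r "priority" "Medium" = p
  by_cases h1 : p = "Critical"
  · subst h1; decide
  by_cases h2 : p = "High"
  · subst h2; decide
  by_cases h3 : p = "Medium"
  · subst h3; decide
  by_cases h4 : p = "Low"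
  · subst h4; decide
  simp [h1, h2, h3, h4]

theorem pvPred_medium : (fun r : List (String × String) => pvBucket r == "Medium") = (fun r => pvRank r == (2 : Int)) := by
  funext r
  simp only [pvBucket, pvRank, pvOfListEq, PySem.Dict.getD_insert, PySem.Dict.getD_empty]
  generalize reqGetD r "priority" "Medium" = p
  by_cases h1 : p = "Critical"
  · subst h1; decide
  by_cases h2 : p = "High"
  · subst h2; decide
  by_cases h3 : p = "Medium"
  · subst h3; decide
  by_cases h4 : p = "Low"
  · subst h4; decide
  simp [h1, h2, h3, h4]

theorem pvPred_low : (fun r : List (String × String) => pvBucket r == "Low") = (fun r => pvRank r == (3 : Int)) := by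
  funext r
  simp only [pvBucket, pvRank, pvOfListEq, PySem.Dict.getD_insert, PySem.Dict.getD_empty]
  generalize reqGetD r "priority" "Medium" = p
  by_cases h1 : p = "Critical"
  · subst h1; decide
  by_cases h2 : p = "High"
  · subst h2; decide
  by_cases h3 : p = "Medium"
  · subst h3; decide
  by_cases h4 : p = "Low"
  · subst h4; decide
  simp [h1, h2, h3, h4]

theorem pvBucket_mem (r : List (String × String)) : pvBucket r ∈ (["Critical", "High", "Medium", "Low"] : List String) := by
  simp only [pvBucket]
  split
  · next h => simpa using h
  · simp

theorem pvKeysG0 : (((((PySem.Dict.empty : PySem.Dict String (List (List (String × String)))).insert "Critical" []).insert "High" []).insert "Medium" []).insert "Low" []).keys = ["Critical", "High", "Medium", "Low"] := by rfl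

theorem pvG0getD (nm : String) : (((((PySem.Dict.empty : PySem.Dict String (List (List (String × String)))).insert "Critical" []).insert "High" []).insert "Medium" []).insert "Low" []).getD nm [] = [] := by
  simp [PySem.Dict.getD_insert, PySem.Dict.getD_empty]

theorem pvFoldA_eq (l : List (List (String × String))) :
    ∀ (g : PySem.Dict String (List (List (String × String)))), g.keys = ["Critical", "High", "Medium", "Low"] →
    l.foldl (fun g req =>
        if g.contains (reqGetD req "priority" "Medium") then g.modify (reqGetD req "priority" "Medium") [] (fun l => l ++ [req])
        else g.modify "Medium" [] (fun l => l ++ [req])) g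
      = l.foldl (fun g req => g.modify (pvBucket req) [] (fun l => l ++ [req])) g := by
  induction l with
  | nil => intro g _; rfl
  | cons r t ih =>
    intro g hg
    simp only [List.foldl_cons]
    have hstep : (if g.contains (reqGetD r "priority" "Medium") then g.modify (reqGetD r "priority" "Medium") [] (fun l => l ++ [r])
        else g.modify "Medium" [] (fun l => l ++ [r])) = g.modify (pvBucket r) [] (fun l => l ++ [r]) := by
      simp only [pvBucket, PySem.Dict.contains_eq_decide_mem_keys, hg]
      by_cases hm : reqGetD r "priority" "Medium" = "Critical" ∨ reqGetD r "priority" "Medium" = "High" ∨ reqGetD r "priority" "Medium" = "Medium" ∨ reqGetD r "priority" "Medium" = "Low"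
      · have hmem : reqGetD r "priority" "Medium" ∈ (["Critical", "High", "Medium", "Low"] : List String) := by simpa using hm
        simp [hmem, hm]
      · have hmem : reqGetD r "priority" "Medium" ∉ (["Critical", "High", "Medium", "Low"] : List String) := by simpa using hm
        simp [hmem, hm]
    rw [hstep]
    refine ih _ ?_
    rw [PySem.Dict.keys_modify, PySem.Dict.keys_insert_of_contains, hg]
    rw [PySem.Dict.contains_eq_decide_mem_keys, hg]
    simpa using pvBucket_mem r

theorem pvFilt_def (l : List (List (String × String))) (i : Int) : l.filter (fun r => pvRank r == i) = pvFilt l i := rfl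

theorem pvGroupedD (l : List (List (String × String))) (nm : String) (i : Int)
    (hpred : (fun r : List (String × String) => pvBucket r == nm) = (fun r => pvRank r == i)) :
    (l.foldl (fun g req =>
        if g.contains (reqGetD req "priority" "Medium") then g.modify (reqGetD req "priority" "Medium") [] (fun l => l ++ [req])
        else g.modify "Medium" [] (fun l => l ++ [req]))
      (((((PySem.Dict.empty : PySem.Dict String (List (List (String × String)))).insert "Critical" []).insert "High" []).insert "Medium" []).insert "Low" [])).getD nm []
      = pvFilt l i := by
  rw [pvFoldA_eq l _ pvKeysG0]
  have hmap : l.foldl (fun g req => g.modify (pvBucket req) [] (fun l => l ++ [req]))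
      (((((PySem.Dict.empty : PySem.Dict String (List (List (String × String)))).insert "Critical" []).insert "High" []).insert "Medium" []).insert "Low" [])
      = (l.map (fun r => (pvBucket r, r))).foldl (fun d p => d.modify p.1 [] (fun x => x ++ [p.2]))
        (((((PySem.Dict.empty : PySem.Dict String (List (List (String × String)))).insert "Critical" []).insert "High" []).insert "Medium" []).insert "Low" []) := by
    rw [List.foldl_map]
  rw [hmap, PySem.Dict.getD_foldl_modify_append, pvG0getD]
  rw [List.filter_map]
  simp only [List.map_map]
  have hcomp : ((fun x : String × List (String × String) => x.2) ∘ fun r => (pvBucket r, r)) = id := rfl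
  have hpredc : ((fun p : String × List (String × String) => p.1 == nm) ∘ fun r => (pvBucket r, r)) = fun r => pvBucket r == nm := rfl
  rw [hcomp, hpredc, hpred, List.map_id, pvFilt_def]
  simp

theorem pvInnerFold (reqs : List (List (String × String))) (lines : List String) :
    reqs.foldl (fun lines req =>
        (match reqGet? req "details" with
          | some d => if d ≠ "" then ((lines ++ ["[" ++ reqGetD req "id" "N/A" ++ "] " ++ reqGetD req "text" ""]) ++ ["    Category: " ++ reqGetD req "category" "N/A"]) ++ ["    Details: " ++ d]
                      else (lines ++ ["[" ++ reqGetD req "id" "N/A" ++ "] " ++ reqGetD req "text" ""]) ++ ["    Category: " ++ reqGetD req "category" "N/A"]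
          | none => (lines ++ ["[" ++ reqGetD req "id" "N/A" ++ "] " ++ reqGetD req "text" ""]) ++ ["    Category: " ++ reqGetD req "category" "N/A"]) ++ [""]) lines
      = lines ++ reqs.flatMap pvBlock := by
  induction reqs generalizing lines with
  | nil => simp
  | cons r t ih =>
    simp only [List.foldl_cons, List.flatMap_cons]
    rw [ih]
    have hb : ((match reqGet? r "details" with
        | some d => if d ≠ "" then ((lines ++ ["[" ++ reqGetD r "id" "N/A" ++ "] " ++ reqGetD r "text" ""]) ++ ["    Category: " ++ reqGetD r "category" "N/A"]) ++ ["    Details: " ++ d]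
                    else (lines ++ ["[" ++ reqGetD r "id" "N/A" ++ "] " ++ reqGetD r "text" ""]) ++ ["    Category: " ++ reqGetD r "category" "N/A"]
        | none => (lines ++ ["[" ++ reqGetD r "id" "N/A" ++ "] " ++ reqGetD r "text" ""]) ++ ["    Category: " ++ reqGetD r "category" "N/A"]) ++ [""])
        = lines ++ pvBlock r := by
      simp only [pvBlock]
      cases h : reqGet? r "details" with
      | none => simp [List.append_assoc]
      | some d => by_cases hd : d = "" <;> simp [hd, List.append_assoc]
    rw [hb, List.append_assoc]

theorem pvSect_if (reqs : List (List (String × String))) (i : Int) (nm : String) (acc : List String) :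
    (if (pvFilt reqs i).isEmpty then acc
     else (acc ++ ["--- " ++ PySem.Str.upper nm ++ " PRIORITY (" ++ PySem.Int.toStr ((pvFilt reqs i).length : Int) ++ ") ---"]) ++ (pvFilt reqs i).flatMap pvBlock)
    = acc ++ pvSect reqs i nm := by
  simp only [pvSect]
  by_cases h : (pvFilt reqs i).isEmpty
  · simp [h]
  · simp [h, List.append_assoc]

-- ===== VERDICT (by name: the statement is the Claim_ definition above) =====
theorem format_security_requirements_text_py_spec : Claim_equal_format_security_requirements_text_py := by
  intro requirements _
  unfold Spec_format_security_requirements_text_py format_security_requirements_text_py format_security_requirements_text_py_alt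
  have henum : PySem.List.enumerate ["Critical", "High", "Medium", "Low"] 0 = [((0 : Int), "Critical"), (1, "High"), (2, "Medium"), (3, "Low")] := by decide
  simp only [henum, List.foldl_cons, List.foldl_nil]
  simp only [pvInnerFold, PySem.List.foldl_append_eq_flatMap,
    pvGroupedD requirements "Critical" 0 pvPred_critical,
    pvGroupedD requirements "High" 1 pvPred_high,
    pvGroupedD requirements "Medium" 2 pvPred_medium,
    pvGroupedD requirements "Low" 3 pvPred_low,
    pvFilt_def, pvSect_if]
  congr 1
  simp [List.append_assoc]
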